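-- pv_equiv track=rewrite | github.com/josh1227/RecessionPrediction | Algorithm C (Final Implementation).py | num_recessions
-- ===== SOURCE A (Python) =====
-- def num_recessions(arr1):
--     begin_index = []
--     finish_index = []
--     k = 0
--     while k < len(arr1)-1:
--         start_index = k
--         while k < len(arr1)-1 and arr1[k] == arr1[k+1]:
--             k = k + 1
--         end_index = k
--         if arr1[k] != 0:
--             begin_index.append(start_index)
--             finish_index.append(end_index)
--         k = k + 1
--     return begin_index, finish_index
-- ===== SOURCE B (Python) =====
-- def num_recessions(arr1):
--     n = len(arr1)
--     boundaries = [i for i in range(n - 1) if arr1[i] != arr1[i + 1]]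
--     starts = [0] + [b + 1 for b in boundaries]
--     ends = boundaries + [n - 1]
--     begin_index = []
--     finish_index = []
--     for s, e in zip(starts, ends):
--         if s < n - 1 and arr1[s] != 0:
--             begin_index.append(s)
--             finish_index.append(e)
--     return begin_index, finish_index
-- ===== Notes on version B (the rewrite author's own statement) =====
-- stated objective: alternative
-- what changed: Replaces A's nested while-loops that scan runs in place with a boundary-index decomposition: collect all i with arr1[i] != arr1[i+1], derive run (start,end) pairs from them, and filter/emit the pairs in one pass.
import Mathlib
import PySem

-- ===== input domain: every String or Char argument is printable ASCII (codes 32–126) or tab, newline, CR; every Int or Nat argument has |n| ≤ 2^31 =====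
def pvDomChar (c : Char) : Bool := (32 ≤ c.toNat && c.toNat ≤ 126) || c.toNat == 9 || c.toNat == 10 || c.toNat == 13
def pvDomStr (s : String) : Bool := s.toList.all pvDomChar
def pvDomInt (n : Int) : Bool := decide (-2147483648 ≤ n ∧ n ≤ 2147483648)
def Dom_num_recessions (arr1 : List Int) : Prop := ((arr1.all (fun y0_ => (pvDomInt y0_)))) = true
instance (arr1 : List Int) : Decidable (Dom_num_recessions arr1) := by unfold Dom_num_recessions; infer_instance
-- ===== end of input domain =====

-- B replaces A's nested run-scanning while-loops with a boundary-index decomposition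
-- (collect all i with arr1[i] != arr1[i+1], derive (start,end) run pairs, filter in one pass);
-- same cost, different decomposition.

-- ===== PORT A =====
-- inner while loop: advance k while k < len-1 and arr1[k] == arr1[k+1]
-- (fuel = a loop-iteration bound; always called with enough fuel, see nrInner_eq below)
def nrInner (arr : List Int) (fuel k : Nat) : Nat :=
  match fuel with
  | 0 => k
  | fuel+1 =>
    if k < arr.length - 1 ∧ arr.getD k 0 = arr.getD (k+1) 0 then nrInner arr fuel (k+1) else k

-- outer while loop of A, carrying begin_index / finish_index
def nrOuter (arr : List Int) (fuel : Nat) (k : Nat) (b f : List Int) : List Int × List Int :=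
  match fuel with
  | 0 => (b, f)
  | fuel+1 =>
    if k < arr.length - 1 then
      let e := nrInner arr arr.length k
      if arr.getD e 0 ≠ 0 then nrOuter arr fuel (e+1) (b ++ [(k : Int)]) (f ++ [(e : Int)])
      else nrOuter arr fuel (e+1) b f
    else (b, f)

def num_recessions (arr1 : List Int) : List Int × List Int := nrOuter arr1 arr1.length 0 [] []

-- ===== PORT B =====
def num_recessions_alt (arr1 : List Int) : List Int × List Int :=
  let n := arr1.length
  let m : Int := (n : Int) - 1
  let boundaries := (List.range (n - 1)).filter (fun i => arr1.getD i 0 ≠ arr1.getD (i+1) 0)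
  let starts : List Nat := 0 :: boundaries.map (· + 1)
  let ends : List Int := boundaries.map (fun b => Int.ofNat b) ++ [m]
  (starts.zip ends).foldl
    (fun acc se =>
      if (se.1 : Int) < m ∧ arr1.getD se.1 0 ≠ 0 then (acc.1 ++ [(se.1 : Int)], acc.2 ++ [se.2])
      else acc)
    ([], [])

-- ===== PRECONDITION & SPEC =====
def Spec_num_recessions (arr1 : List Int) (out : List Int × List Int) : Prop := out = num_recessions_alt arr1
instance (arr1 : List Int) (out : List Int × List Int) : Decidable (Spec_num_recessions arr1 out) := by unfold Spec_num_recessions; infer_instance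

-- ===== CLAIM (what is proved, stated in full; the proofs are below) =====
def Claim_equal_num_recessions : Prop := ∀ (arr1 : List Int), Dom_num_recessions arr1 → Spec_num_recessions arr1 (num_recessions arr1)

-- ===== LEMMAS AND PROOFS =====

-- proof-side well-founded (fuel-free) versions of A's two loops, and bridges to the fuel ports
def nrInnerW (arr : List Int) (k : Nat) : Nat :=
  if h : k < arr.length - 1 ∧ arr.getD k 0 = arr.getD (k+1) 0 then nrInnerW arr (k+1) else k
termination_by arr.length - 1 - k
decreasing_by omega

theorem nrInnerW_ge (arr : List Int) (k : Nat) : k ≤ nrInnerW arr k := by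
  fun_induction nrInnerW arr k with
  | case1 k h ih => omega
  | case2 k h => omega

def nrOuterW (arr : List Int) (k : Nat) (b f : List Int) : List Int × List Int :=
  if h : k < arr.length - 1 then
    let e := nrInnerW arr k
    if arr.getD e 0 ≠ 0 then nrOuterW arr (e+1) (b ++ [(k : Int)]) (f ++ [(e : Int)])
    else nrOuterW arr (e+1) b f
  else (b, f)
termination_by arr.length - k
decreasing_by
  · have := nrInnerW_ge arr k; omega
  · have := nrInnerW_ge arr k; omega

theorem nrInner_eq (arr : List Int) (fuel k : Nat) (hf : arr.length - 1 - k ≤ fuel) :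
    nrInner arr fuel k = nrInnerW arr k := by
  induction fuel generalizing k with
  | zero =>
    rw [nrInner, nrInnerW]
    rw [dif_neg (by omega)]
  | succ fuel ih =>
    rw [nrInner, nrInnerW]
    by_cases h : k < arr.length - 1 ∧ arr.getD k 0 = arr.getD (k+1) 0
    · rw [if_pos h, dif_pos h]
      exact ih (k+1) (by omega)
    · rw [if_neg h, dif_neg h]

theorem nrOuter_eq (arr : List Int) (fuel k : Nat) (b f : List Int) (hf : arr.length - k ≤ fuel) :
    nrOuter arr fuel k b f = nrOuterW arr k b f := by
  induction fuel generalizing k b f with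
  | zero =>
    rw [nrOuter, nrOuterW]
    rw [dif_neg (by omega)]
  | succ fuel ih =>
    rw [nrOuter, nrOuterW]
    by_cases h : k < arr.length - 1
    · rw [if_pos h, dif_pos h]
      have hi : nrInner arr arr.length k = nrInnerW arr k := nrInner_eq arr arr.length k (by omega)
      have hge := nrInnerW_ge arr k
      rw [hi]
      by_cases hz : arr.getD (nrInnerW arr k) 0 ≠ 0
      · rw [if_pos hz, if_pos hz]
        exact ih _ _ _ (by omega)
      · rw [if_neg hz, if_neg hz]
        exact ih _ _ _ (by omega)
    · rw [if_neg h, dif_neg h]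


theorem nrInnerW_le (arr : List Int) (k : Nat) (hk : k ≤ arr.length - 1) :
    nrInnerW arr k ≤ arr.length - 1 := by
  fun_induction nrInnerW arr k with
  | case1 k h ih => exact ih (by omega)
  | case2 k h => exact hk

theorem nrInnerW_getD (arr : List Int) (k : Nat) :
    arr.getD (nrInnerW arr k) 0 = arr.getD k 0 := by
  fun_induction nrInnerW arr k with
  | case1 k h ih => rw [ih]; exact h.2.symm
  | case2 k h => rfl

-- boundaries at indices ≥ k
def bnd (arr : List Int) (k : Nat) : List Nat :=
  (List.range' k (arr.length - 1 - k)).filter (fun i => arr.getD i 0 ≠ arr.getD (i+1) 0)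

theorem bnd_eq (arr : List Int) (k : Nat) (hk : k ≤ arr.length - 1) :
    bnd arr k =
      if nrInnerW arr k < arr.length - 1 then nrInnerW arr k :: bnd arr (nrInnerW arr k + 1) else [] := by
  fun_induction nrInnerW arr k with
  | case1 k h ih =>
    have hsplit : arr.length - 1 - k = (arr.length - 1 - (k+1)) + 1 := by omega
    have hstep : bnd arr k = bnd arr (k+1) := by
      unfold bnd
      rw [hsplit, List.range'_succ, List.filter_cons,
        if_neg (by simp only [decide_eq_true_eq, ne_eq, not_not]; exact h.2)]
    rw [hstep]
    exact ih (by omega)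
  | case2 k h =>
    by_cases hlt : k < arr.length - 1
    · have hne : arr.getD k 0 ≠ arr.getD (k+1) 0 := by tauto
      have hsplit : arr.length - 1 - k = (arr.length - 1 - (k+1)) + 1 := by omega
      rw [if_pos hlt]
      unfold bnd
      rw [hsplit, List.range'_succ, List.filter_cons, if_pos (decide_eq_true hne)]
    · have hk' : k = arr.length - 1 := by omega
      rw [if_neg hlt]
      unfold bnd
      rw [show arr.length - 1 - k = 0 by omega]
      simp

-- the list of runs starting at k (each run paired with its last index as A sees it)
def runsF (arr : List Int) (k : Nat) : List (Nat × Nat) :=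
  if h : k < arr.length then (k, nrInnerW arr k) :: runsF arr (nrInnerW arr k + 1) else []
termination_by arr.length - k
decreasing_by have := nrInnerW_ge arr k; omega

theorem zip_eq (arr : List Int) (hn : 1 ≤ arr.length) (k : Nat) (hk : k ≤ arr.length - 1) :
    ((k :: (bnd arr k).map (· + 1)).zip ((bnd arr k).map (fun b => Int.ofNat b) ++ [(arr.length : Int) - 1]))
      = (runsF arr k).map (fun p => (p.1, (p.2 : Int))) := by
  fun_induction runsF arr k with
  | case1 k h ih =>
    rw [bnd_eq arr k hk]
    by_cases hlt : nrInnerW arr k < arr.length - 1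
    · rw [if_pos hlt]
      rw [List.map_cons, List.map_cons, List.cons_append, List.zip_cons_cons, List.map_cons,
        ← ih (by omega)]
      simp
    · have hle := nrInnerW_le arr k hk
      have heq : nrInnerW arr k = arr.length - 1 := by omega
      rw [if_neg hlt]
      have hr : runsF arr (nrInnerW arr k + 1) = [] := by
        unfold runsF
        rw [dif_neg (by omega)]
      rw [hr]
      simp only [List.map_nil, List.nil_append, List.zip_cons_cons, List.map_cons, List.map_nil,
        List.zip_nil_right]
      have hc : ((nrInnerW arr k : Nat) : Int) = (arr.length : Int) - 1 := by
        simp only [heq]; omega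
      rw [hc]
  | case2 k h => omega

theorem outer_eq (arr : List Int) (k : Nat) (b f : List Int) :
    nrOuterW arr k b f =
      (runsF arr k).foldl
        (fun acc p =>
          if (p.1 : Int) < (arr.length : Int) - 1 ∧ arr.getD p.1 0 ≠ 0 then
            (acc.1 ++ [(p.1 : Int)], acc.2 ++ [(p.2 : Int)])
          else acc)
        (b, f) := by
  fun_induction nrOuterW arr k b f with
  | case1 k b f h e hne ih =>
    have hr : runsF arr k = (k, nrInnerW arr k) :: runsF arr (nrInnerW arr k + 1) := by
      conv_lhs => rw [runsF.eq_def]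
      rw [dif_pos (by omega)]
    rw [hr, List.foldl_cons]
    have hg : ((k : Int) < (arr.length : Int) - 1 ∧ arr.getD k 0 ≠ 0) := by
      constructor
      · omega
      · rw [← nrInnerW_getD arr k]; exact hne
    rw [if_pos hg]
    exact ih
  | case2 k b f h e hne ih =>
    have hr : runsF arr k = (k, nrInnerW arr k) :: runsF arr (nrInnerW arr k + 1) := by
      conv_lhs => rw [runsF.eq_def]
      rw [dif_pos (by omega)]
    rw [hr, List.foldl_cons]
    have hg : ¬ ((k : Int) < (arr.length : Int) - 1 ∧ arr.getD k 0 ≠ 0) := by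
      rw [← nrInnerW_getD arr k]
      tauto
    rw [if_neg hg]
    exact ih
  | case3 k b f h =>
    by_cases hk : k < arr.length
    · have hkk : k = arr.length - 1 := by omega
      have hinner : nrInnerW arr k = k := by
        unfold nrInnerW; rw [dif_neg (by omega)]
      have hr : runsF arr k = (k, k) :: runsF arr (k + 1) := by
        conv_lhs => rw [runsF.eq_def]
        rw [dif_pos hk, hinner]
      have hr2 : runsF arr (k + 1) = [] := by
        unfold runsF; rw [dif_neg (by omega)]
      rw [hr, hr2, List.foldl_cons, List.foldl_nil]
      rw [if_neg (by push_cast; omega)]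
    · have hr : runsF arr k = [] := by
        unfold runsF; rw [dif_neg hk]
      rw [hr, List.foldl_nil]

-- ===== VERDICT (by name: the statement is the Claim_ definition above) =====
theorem num_recessions_spec : Claim_equal_num_recessions := by
  intro arr _
  unfold Spec_num_recessions num_recessions num_recessions_alt
  rw [nrOuter_eq arr arr.length 0 [] [] (by omega)]
  rcases arr with _ | ⟨x, rest⟩
  · simp [nrOuterW, List.zip]
  · set arr := x :: rest with harr
    have hn : 1 ≤ arr.length := by simp [harr]
    have hb : (List.range (arr.length - 1)).filter
        (fun i => arr.getD i 0 ≠ arr.getD (i+1) 0) = bnd arr 0 := by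
      unfold bnd
      rw [List.range_eq_range', Nat.sub_zero]
    simp only
    rw [hb, zip_eq arr hn 0 (by omega), List.foldl_map, outer_eq]
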